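-- pv_equiv track=rewrite | github.com/PatrickNymark/python-exam | player.py | check_if_valid_ship
-- ===== SOURCE A (Python) =====
-- def check_if_valid_ship(ship_coordinates, new_coordinate):
--     """
--         Checks if coordinates including the new coordinate is consecutive on either the x or the y axis.
--         This includes checking for duplicates, since if there is a duplicate the numbers wont be consecutive
--         on either axis.
--     """
--     # first coordinate - skip validation
--     if len(ship_coordinates) == 0:
--         return True
--
--     # to not mutate the original list we add the new coordinate to a temporary list
--     total_coordinates = [ship for ship in ship_coordinates]
--     total_coordinates.append(new_coordinate)
--
--     x_positions = [x[0] for x in total_coordinates]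
--     y_positions = [y[1] for y in total_coordinates]
--
--     if sorted(x_positions) == list(range(min(x_positions), max(x_positions)+1)) or sorted(y_positions) == list(range(min(y_positions), max(y_positions)+1)):
--         return True
--
--     return False
-- ===== SOURCE B (Python) =====
-- def _is_consecutive(vals):
--     # no duplicates and the value range has exactly len(vals) slots
--     return len(set(vals)) == len(vals) and max(vals) - min(vals) == len(vals) - 1
--
-- def check_if_valid_ship(ship_coordinates, new_coordinate):
--     if len(ship_coordinates) == 0:
--         return True
--     xs = [c[0] for c in ship_coordinates] + [new_coordinate[0]]
--     ys = [c[1] for c in ship_coordinates] + [new_coordinate[1]]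
--     return _is_consecutive(xs) or _is_consecutive(ys)
-- ===== Notes on version B (the rewrite author's own statement) =====
-- stated objective: simpler
-- what changed: Replaces A's sort-and-compare-against-range(min,max+1) test by a linear duplicate-free-plus-width check (len(set(vals))==len(vals) and max-min==len-1) per axis, with no sorting and no range list built.
import Mathlib
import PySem

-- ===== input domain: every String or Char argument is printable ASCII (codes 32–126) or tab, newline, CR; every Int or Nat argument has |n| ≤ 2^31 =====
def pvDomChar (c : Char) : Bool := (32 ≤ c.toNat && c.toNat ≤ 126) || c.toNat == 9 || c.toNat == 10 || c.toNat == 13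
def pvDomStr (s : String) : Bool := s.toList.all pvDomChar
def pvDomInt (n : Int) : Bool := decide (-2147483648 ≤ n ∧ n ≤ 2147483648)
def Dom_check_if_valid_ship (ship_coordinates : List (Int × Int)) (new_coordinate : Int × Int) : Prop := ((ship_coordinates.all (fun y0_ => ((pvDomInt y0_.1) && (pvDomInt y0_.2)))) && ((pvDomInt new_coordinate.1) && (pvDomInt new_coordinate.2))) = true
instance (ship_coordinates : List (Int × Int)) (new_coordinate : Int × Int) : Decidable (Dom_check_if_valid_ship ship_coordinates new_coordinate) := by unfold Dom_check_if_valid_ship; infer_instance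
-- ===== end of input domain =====

-- B replaces A's sort-and-compare-with-range(min,max+1) per axis by a linear
-- "no duplicates and max-min == len-1" check (objective: simpler, no sorting).

-- ===== PORT A =====
def check_if_valid_ship (ship_coordinates : List (Int × Int)) (new_coordinate : Int × Int) : Bool :=
  if ship_coordinates.length == 0 then true
  else
    let total_coordinates := (ship_coordinates.map (fun ship => ship)) ++ [new_coordinate]
    let x_positions := total_coordinates.map (fun x => x.1)
    let y_positions := total_coordinates.map (fun y => y.2)
    if (PySem.List.sorted x_positions (fun v => v) ==
          PySem.List.pyRange ((PySem.List.min? x_positions (fun v => v)).getD 0)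
            ((PySem.List.max? x_positions (fun v => v)).getD 0 + 1) 1)
       || (PySem.List.sorted y_positions (fun v => v) ==
          PySem.List.pyRange ((PySem.List.min? y_positions (fun v => v)).getD 0)
            ((PySem.List.max? y_positions (fun v => v)).getD 0 + 1) 1)
    then true
    else false

-- ===== PORT B =====
def pvIsConsecutive (vals : List Int) : Bool :=
  (PySem.Set.len (PySem.Set.ofList vals) == (vals.length : Int)) &&
  ((PySem.List.max? vals (fun v => v)).getD 0 - (PySem.List.min? vals (fun v => v)).getD 0
      == (vals.length : Int) - 1)

def check_if_valid_ship_alt (ship_coordinates : List (Int × Int)) (new_coordinate : Int × Int) : Bool :=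
  if ship_coordinates.length == 0 then true
  else
    let xs := ship_coordinates.map (fun c => c.1) ++ [new_coordinate.1]
    let ys := ship_coordinates.map (fun c => c.2) ++ [new_coordinate.2]
    pvIsConsecutive xs || pvIsConsecutive ys

-- ===== PRECONDITION & SPEC =====
def Spec_check_if_valid_ship (ship_coordinates : List (Int × Int)) (new_coordinate : Int × Int) (out : Bool) : Prop := out = check_if_valid_ship_alt ship_coordinates new_coordinate
instance (ship_coordinates : List (Int × Int)) (new_coordinate : Int × Int) (out : Bool) : Decidable (Spec_check_if_valid_ship ship_coordinates new_coordinate out) := by unfold Spec_check_if_valid_ship; infer_instance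

-- ===== CLAIM (what is proved, stated in full; the proofs are below) =====
def Claim_equal_check_if_valid_ship : Prop := ∀ (ship_coordinates : List (Int × Int)) (new_coordinate : Int × Int), Dom_check_if_valid_ship ship_coordinates new_coordinate → Spec_check_if_valid_ship ship_coordinates new_coordinate (check_if_valid_ship ship_coordinates new_coordinate)

-- ===== LEMMAS AND PROOFS =====

-- len(set(vals)) == len(vals) iff vals has no duplicates
theorem pvOfList_length_eq_iff_nodup (vals : List Int) :
    (PySem.Set.ofList vals).length = vals.length ↔ vals.Nodup := by
  constructor
  · intro h
    have hsub : List.Subperm (PySem.Set.ofList vals : List Int) vals :=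
      List.subperm_of_subset (PySem.Set.nodup_ofList vals)
        (fun x hx => (PySem.Set.mem_ofList vals x).mp hx)
    have hperm : List.Perm (PySem.Set.ofList vals : List Int) vals :=
      hsub.perm_of_length_le (by omega)
    exact hperm.nodup (PySem.Set.nodup_ofList vals)
  · intro hnd
    have h1 : List.Subperm (PySem.Set.ofList vals : List Int) vals :=
      List.subperm_of_subset (PySem.Set.nodup_ofList vals)
        (fun x hx => (PySem.Set.mem_ofList vals x).mp hx)
    have h2 : List.Subperm vals (PySem.Set.ofList vals : List Int) :=
      List.subperm_of_subset hnd (fun x hx => (PySem.Set.mem_ofList vals x).mpr hx)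
    exact (h1.antisymm h2).length_eq

-- key equivalence on one nonempty axis list
theorem pvConsec_eq (vals : List Int) (h : vals ≠ []) :
    (PySem.List.sorted vals (fun v => v) ==
      PySem.List.pyRange ((PySem.List.min? vals (fun v => v)).getD 0)
        ((PySem.List.max? vals (fun v => v)).getD 0 + 1) 1)
    = pvIsConsecutive vals := by
  obtain ⟨m, hm⟩ : ∃ m, PySem.List.min? vals (fun v => v) = some m := by
    cases hmin : PySem.List.min? vals (fun v => v) with
    | none => exact absurd ((PySem.List.min?_eq_none_iff vals _).mp hmin) h
    | some m => exact ⟨m, rfl⟩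
  obtain ⟨M, hM⟩ : ∃ M, PySem.List.max? vals (fun v => v) = some M := by
    cases hmax : PySem.List.max? vals (fun v => v) with
    | none => exact absurd ((PySem.List.max?_eq_none_iff vals _).mp hmax) h
    | some M => exact ⟨M, rfl⟩
  have hmmem : m ∈ vals := PySem.List.min?_mem hm
  have hmM : m ≤ M := PySem.List.max?_isMax hM m hmmem
  have hlenpos : 0 < vals.length := List.length_pos_iff.mpr h
  rw [hm, hM]
  simp only [pvIsConsecutive, hm, hM, Option.getD_some, PySem.Set.len]
  rw [Bool.eq_iff_iff]
  simp only [beq_iff_eq, Bool.and_eq_true]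
  constructor
  · intro hs
    have hperm : List.Perm vals (PySem.List.pyRange m (M + 1) 1) :=
      (PySem.List.sorted_perm vals (fun v => v) false).symm.trans (by rw [hs])
    have hnd : vals.Nodup := hperm.symm.nodup (PySem.List.nodup_pyRange_one m (M + 1))
    have hlen : vals.length = (M + 1 - m).toNat := by
      rw [hperm.length_eq, PySem.List.length_pyRange_one]
    constructor
    · rw [(pvOfList_length_eq_iff_nodup vals).mpr hnd]
    · omega
  · rintro ⟨hset, hwidth⟩
    have hnd : vals.Nodup := (pvOfList_length_eq_iff_nodup vals).mp (by omega)
    have hsub2 : vals ⊆ PySem.List.pyRange m (M + 1) 1 := by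
      intro x hx
      rw [PySem.List.mem_pyRange_one]
      exact ⟨PySem.List.min?_isMin hm x hx, by
        have := PySem.List.max?_isMax hM x hx; omega⟩
    have hlenr : (PySem.List.pyRange m (M + 1) 1).length = vals.length := by
      rw [PySem.List.length_pyRange_one]; omega
    have hperm : List.Perm (PySem.List.pyRange m (M + 1) 1) vals :=
      ((List.subperm_of_subset hnd hsub2).perm_of_length_le (by omega)).symm
    exact PySem.List.sorted_eq_of_perm_of_pairwise_lt vals _ (fun v => v) hperm
      (PySem.List.pairwise_lt_pyRange_one m (M + 1))

-- ===== VERDICT (by name: the statement is the Claim_ definition above) =====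
theorem check_if_valid_ship_spec : Claim_equal_check_if_valid_ship := by
  intro sc nc _
  unfold Spec_check_if_valid_ship check_if_valid_ship check_if_valid_ship_alt
  by_cases hsc : sc = []
  · subst hsc; simp
  · have hlen : (sc.length == 0) = false := by
      simp [List.length_eq_zero_iff, hsc]
    simp only [hlen, Bool.false_eq_true, if_false]
    have hxs : ((sc.map (fun ship => ship)) ++ [nc]).map (fun x => x.1)
        = sc.map (fun c => c.1) ++ [nc.1] := by simp
    have hys : ((sc.map (fun ship => ship)) ++ [nc]).map (fun y => y.2)
        = sc.map (fun c => c.2) ++ [nc.2] := by simp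
    rw [hxs, hys, pvConsec_eq _ (by simp), pvConsec_eq _ (by simp)]
    cases pvIsConsecutive (sc.map (fun c => c.1) ++ [nc.1]) <;>
      cases pvIsConsecutive (sc.map (fun c => c.2) ++ [nc.2]) <;> simp
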